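-- pv_equiv track=rewrite | github.com/artpromedia/skillancer | services/ml-recommendation-svc/app/models/proposal_model.py | _has_cta
-- ===== SOURCE A (Python) =====
-- def _has_cta(proposal: str) -> bool:
--     """Check if proposal has a call-to-action"""
--     cta_phrases = [
--         'let\'s discuss', 'schedule a call', 'happy to chat',
--         'looking forward', 'let me know', 'available to start',
--         'reach out', 'get in touch', 'would love to'
--     ]
--     proposal_lower = proposal.lower()
--     return any(phrase in proposal_lower for phrase in cta_phrases)
-- ===== SOURCE B (Python) =====
-- def _has_cta(proposal: str) -> bool:
--     """Check if proposal has a call-to-action"""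
--     cta_phrases = [
--         'let\'s discuss', 'schedule a call', 'happy to chat',
--         'looking forward', 'let me know', 'available to start',
--         'reach out', 'get in touch', 'would love to'
--     ]
--     s = proposal.lower()
--     # single left-to-right scan: at each position test whether any phrase starts there
--     return any(any(s.startswith(p, i) for p in cta_phrases) for i in range(len(s) + 1))
-- ===== Notes on version B (the rewrite author's own statement) =====
-- stated objective: alternative
-- what changed: Phrase-major containment tests (one full substring search per phrase) are replaced by a position-major single left-to-right scan that at each index checks whether any phrase begins there.
import Mathlib
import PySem

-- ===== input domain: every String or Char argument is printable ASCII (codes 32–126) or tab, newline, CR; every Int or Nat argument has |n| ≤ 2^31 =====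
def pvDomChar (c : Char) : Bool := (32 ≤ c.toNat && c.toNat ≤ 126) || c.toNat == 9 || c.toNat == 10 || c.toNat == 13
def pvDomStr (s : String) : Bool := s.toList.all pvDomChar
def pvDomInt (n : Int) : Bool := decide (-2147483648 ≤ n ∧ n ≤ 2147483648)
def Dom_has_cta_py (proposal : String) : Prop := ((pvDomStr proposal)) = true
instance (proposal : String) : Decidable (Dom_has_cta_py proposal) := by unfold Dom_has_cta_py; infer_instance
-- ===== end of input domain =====

-- B replaces A's per-phrase substring tests by one position-major left-to-right scan (alternative, same cost).

-- ===== PORT A =====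
def ctaPhrases : List String :=
  ["let's discuss", "schedule a call", "happy to chat",
   "looking forward", "let me know", "available to start",
   "reach out", "get in touch", "would love to"]

def has_cta_py (proposal : String) : Bool :=
  let proposal_lower := PySem.Str.lower proposal
  ctaPhrases.any (fun phrase => PySem.Str.isIn phrase proposal_lower)

-- ===== PORT B =====
-- 'any(s.startswith(p, i) for p in phrases)' then step to the next position: recursion over suffixes
def ctaScan (phrases : List (List Char)) : List Char → Bool
  | [] => phrases.any (fun p => p.isPrefixOf ([] : List Char))
  | c :: rest => phrases.any (fun p => p.isPrefixOf (c :: rest)) || ctaScan phrases rest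

def has_cta_py_alt (proposal : String) : Bool :=
  ctaScan (ctaPhrases.map String.toList) (PySem.Str.lower proposal).toList

-- ===== PRECONDITION & SPEC =====
def Spec_has_cta_py (proposal : String) (out : Bool) : Prop := out = has_cta_py_alt proposal
instance (proposal : String) (out : Bool) : Decidable (Spec_has_cta_py proposal out) := by unfold Spec_has_cta_py; infer_instance

-- ===== CLAIM (what is proved, stated in full; the proofs are below) =====
def Claim_equal_has_cta_py : Prop := ∀ (proposal : String), Dom_has_cta_py proposal → Spec_has_cta_py proposal (has_cta_py proposal)

-- ===== LEMMAS AND PROOFS =====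

theorem ctaScan_iff (phrases : List (List Char)) (l : List Char) :
    ctaScan phrases l = true ↔ ∃ p ∈ phrases, p <:+: l := by
  induction l with
  | nil =>
    simp [ctaScan, List.any_eq_true, List.IsPrefix, List.isPrefixOf_iff_prefix]
  | cons c rest ih =>
    simp only [ctaScan, Bool.or_eq_true, List.any_eq_true, List.isPrefixOf_iff_prefix, ih]
    constructor
    · rintro (⟨p, hp, h⟩ | ⟨p, hp, h⟩)
      · exact ⟨p, hp, h.isInfix⟩
      · exact ⟨p, hp, h.trans (List.infix_cons_iff.mpr (Or.inr (List.infix_refl rest)))⟩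
    · rintro ⟨p, hp, h⟩
      rcases List.infix_cons_iff.mp h with h' | h'
      · exact Or.inl ⟨p, hp, h'⟩
      · exact Or.inr ⟨p, hp, h'⟩

theorem has_cta_eq (proposal : String) : has_cta_py proposal = has_cta_py_alt proposal := by
  rw [Bool.eq_iff_iff]
  rw [has_cta_py_alt, ctaScan_iff]
  simp only [has_cta_py, List.any_eq_true]
  constructor
  · rintro ⟨p, hp, hin⟩
    exact ⟨p.toList, List.mem_map_of_mem hp, (PySem.Str.isIn_iff_infix p _).mp hin⟩
  · rintro ⟨p, hp, hinf⟩
    obtain ⟨q, hq, rfl⟩ := List.mem_map.mp hp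
    exact ⟨q, hq, (PySem.Str.isIn_iff_infix q _).mpr hinf⟩

-- ===== VERDICT (by name: the statement is the Claim_ definition above) =====
theorem has_cta_py_spec : Claim_equal_has_cta_py := by
  intro proposal _
  unfold Spec_has_cta_py
  exact has_cta_eq proposal
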